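-- pv_equiv track=rewrite | github.com/ambrosejcarr/seqc | src/seqc/sa_process/basic_suffix_array.py | radixPass
-- ===== SOURCE A (Python) =====
-- def radixPass(a, b, r, n, K):
-- 	counter = [0,] * (K+1)
-- 	i = 0
-- 	for i in range(n):
-- 		counter[r[a[i]]] += 1
--
-- 	the_sum = 0
-- 	for i in range(K + 1):
-- 		t = counter[i]
-- 		counter[i] = the_sum
-- 		the_sum += t
--
-- 	for i in range(n):
-- 		b[counter[r[a[i]]]] = a[i]
-- 		counter[r[a[i]]] += 1
-- 		#b[counter[r[a[i]]]] += 1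
-- 		#b[c[r[a[i]]]
--
-- 	return b
-- ===== SOURCE B (Python) =====
-- def radixPass(a, b, r, n, K):
--     # Bucket pass: group values by rank into per-key lists (stable), then
--     # write them back into b in key order.  Mutates b in place like the original.
--     buckets = [[] for _ in range(K + 1)]
--     for i in range(n):
--         v = a[i]
--         buckets[r[v]].append(v)
--     idx = 0
--     for key in range(K + 1):
--         for v in buckets[key]:
--             b[idx] = v
--             idx += 1
--     return b
-- ===== Notes on version B (the rewrite author's own statement) =====
-- stated objective: alternative
-- what changed: Replaces the counting/prefix-sum/scatter pass with per-rank bucket lists filled in one stable pass and flushed back into b in rank order with a running index, eliminating the offset counter array; like A it mutates b in place and returns it.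
-- outside the precondition, e.g. on radixPass([0, 1], [9, 9], [-1, 0], 2, 1): A returns [1, 0], B returns [1, 0]; on radixPass([-1, 0], [9, 9], [1, 0], 2, 1): A returns [-1, 0], B returns [-1, 0]
import Mathlib
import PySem

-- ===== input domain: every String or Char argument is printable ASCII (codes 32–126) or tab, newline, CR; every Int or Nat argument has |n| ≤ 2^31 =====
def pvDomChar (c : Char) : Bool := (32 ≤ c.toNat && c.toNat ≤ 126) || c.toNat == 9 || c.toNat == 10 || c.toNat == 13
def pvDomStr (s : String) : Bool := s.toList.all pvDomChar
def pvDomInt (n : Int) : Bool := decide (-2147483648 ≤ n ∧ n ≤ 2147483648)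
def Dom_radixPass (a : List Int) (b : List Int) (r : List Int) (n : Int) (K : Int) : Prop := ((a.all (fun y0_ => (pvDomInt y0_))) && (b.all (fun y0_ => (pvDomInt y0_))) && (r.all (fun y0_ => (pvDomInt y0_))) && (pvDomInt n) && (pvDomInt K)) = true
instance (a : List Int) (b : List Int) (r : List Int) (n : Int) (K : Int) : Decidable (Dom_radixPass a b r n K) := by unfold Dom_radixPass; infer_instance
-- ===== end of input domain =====

-- B replaces A's counting/prefix-sum/scatter pass by per-rank bucket lists flushed back in rank
-- order (alternative decomposition, same O(n+K) cost); like A it mutates b in place (equivalence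
-- proved about the return value).


-- ===== PORT A =====
-- The Python lists `counter` (A) and `buckets` (B) are local, freshly allocated, and only ever
-- indexed/assigned at a single index; they are ported as Array with the two helpers below.
-- pvAGet c i d / pvASet c i v are Python's c[i] read / c[i] = v assignment, exact for 0 ≤ i < len(c);
-- Python's negative-index wraparound and its IndexError lie outside Pre_radixPass.
def pvAGet {α : Type} (c : Array α) (i : Int) (d : α) : α :=
  if 0 ≤ i then c.getD i.toNat d else d

def pvASet {α : Type} (c : Array α) (i : Int) (v : α) : Array α :=
  if 0 ≤ i then c.setIfInBounds i.toNat v else c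

-- counting sort pass: histogram, exclusive prefix sums, then scatter into b
def radixPass (a : List Int) (b : List Int) (r : List Int) (n : Int) (K : Int) : List Int :=
  -- counter = [0] * (K+1)
  let counter : Array Int := Array.replicate (K + 1).toNat 0
  -- for i in range(n): counter[r[a[i]]] += 1
  let counter :=
    (PySem.List.pyRange 0 n 1).foldl
      (fun c i =>
        let k := PySem.List.pyGetD r (PySem.List.pyGetD a i 0) 0
        let t := pvAGet c k 0 + 1
        pvASet c k t)
      counter
  -- the_sum = 0; for i in range(K+1): t = counter[i]; counter[i] = the_sum; the_sum += t
  let st :=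
    (PySem.List.pyRange 0 (K + 1) 1).foldl
      (fun (st : Array Int × Int) i =>
        let c := st.1
        let s := st.2
        let t := pvAGet c i 0
        (pvASet c i s, s + t))
      (counter, 0)
  -- for i in range(n): b[counter[r[a[i]]]] = a[i]; counter[r[a[i]]] += 1
  let st2 :=
    (PySem.List.pyRange 0 n 1).foldl
      (fun (st : List Int × Array Int) i =>
        let bl := st.1
        let c := st.2
        let k := PySem.List.pyGetD r (PySem.List.pyGetD a i 0) 0
        let p := pvAGet c k 0
        (PySem.List.pySetD bl p (PySem.List.pyGetD a i 0), pvASet c k (p + 1)))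
      (b, st.1)
  st2.1

-- ===== PORT B =====
-- bucket pass: group the values by rank into per-key lists, then flush in key order
def radixPass_alt (a : List Int) (b : List Int) (r : List Int) (n : Int) (K : Int) : List Int :=
  -- buckets = [[] for _ in range(K+1)]
  let buckets : Array (List Int) := Array.replicate (K + 1).toNat []
  -- for i in range(n): v = a[i]; buckets[r[v]].append(v)
  let buckets :=
    (PySem.List.pyRange 0 n 1).foldl
      (fun bs i =>
        let v := PySem.List.pyGetD a i 0
        let k := PySem.List.pyGetD r v 0
        let cur := pvAGet bs k []
        pvASet bs k (cur ++ [v]))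
      buckets
  -- idx = 0; for key in range(K+1): for v in buckets[key]: b[idx] = v; idx += 1
  let st :=
    (PySem.List.pyRange 0 (K + 1) 1).foldl
      (fun (st : List Int × Int) key =>
        (pvAGet buckets key []).foldl
          (fun (st : List Int × Int) v => (PySem.List.pySetD st.1 st.2 v, st.2 + 1)) st)
      (b, 0)
  st.1

-- ===== PRECONDITION & SPEC =====
-- Pre_ excludes inputs where Python raises (n > len(a), n > len(b), out-of-range values or ranks)
-- and, when n > 0, inputs with negative a[i] or negative ranks r[a[i]], on which A returns only by
-- Python's accidental negative-index wraparound into r and the counter (B's Python agrees there;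
-- the exclusion is of the accidental corner, see claim cites).
def Pre_radixPass (a : List Int) (b : List Int) (r : List Int) (n : Int) (K : Int) : Prop :=
  n ≤ 0 ∨ (0 ≤ K ∧ n ≤ (a.length : Int) ∧ n ≤ (b.length : Int) ∧
    ∀ v ∈ a.take n.toNat, 0 ≤ v ∧ v < (r.length : Int) ∧
      0 ≤ PySem.List.pyGetD r v 0 ∧ PySem.List.pyGetD r v 0 ≤ K)
instance (a : List Int) (b : List Int) (r : List Int) (n : Int) (K : Int) : Decidable (Pre_radixPass a b r n K) := by unfold Pre_radixPass; infer_instance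
def pvWitness_radixPass : List Int × List Int × List Int × Int × Int := ([1, 0, 2], [0, 0, 0], [1, 0, 1], 3, 1)

def Spec_radixPass (a : List Int) (b : List Int) (r : List Int) (n : Int) (K : Int) (out : List Int) : Prop := out = radixPass_alt a b r n K
instance (a : List Int) (b : List Int) (r : List Int) (n : Int) (K : Int) (out : List Int) : Decidable (Spec_radixPass a b r n K out) := by unfold Spec_radixPass; infer_instance

-- ===== CLAIM (what is proved, stated in full; the proofs are below) =====
def Claim_equal_radixPass : Prop := ∀ (a : List Int) (b : List Int) (r : List Int) (n : Int) (K : Int), Dom_radixPass a b r n K → Pre_radixPass a b r n K → Spec_radixPass a b r n K (radixPass a b r n K)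

-- ===== LEMMAS AND PROOFS =====

-- proof-side vocabulary ------------------------------------------------------
def pvBump (c : Array Int) (k : Int) : Array Int :=
  pvASet c k (pvAGet c k 0 + 1)

def pvWithPos (key : Int → Int) : Array Int → List Int → List (Int × Int)
  | _, [] => []
  | c, v :: vs => (pvAGet c (key v) 0, v) :: pvWithPos key (pvBump c (key v)) vs

def pvEnumFrom : Int → List Int → List (Int × Int)
  | _, [] => []
  | s, v :: vs => (s, v) :: pvEnumFrom (s + 1) vs

def pvApplyW (b0 : List Int) (ws : List (Int × Int)) : List Int :=
  ws.foldl (fun bb w => PySem.List.pySetD bb w.1 w.2) b0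

def pvGroup (key : Int → Int) (vals : List Int) (k : Int) : List Int :=
  vals.filter (fun v => key v == k)

def pvOff (key : Int → Int) (vals : List Int) (k : Int) : Int :=
  ∑ j ∈ Finset.range k.toNat, ((pvGroup key vals (j : Int)).length : Int)

def pvGW (g : Int → List Int) : List Int → Int → List (Int × Int)
  | [], _ => []
  | k :: ks, idx => pvEnumFrom idx (g k) ++ pvGW g ks (idx + (g k).length)

-- generic small lemmas -------------------------------------------------------
theorem pvAGetReplicate {α : Type} (m : Nat) (k : Int) (d : α) :
    pvAGet (Array.replicate m d) k d = d := by
  unfold pvAGet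
  split_ifs with h
  · unfold Array.getD
    split_ifs with h2
    · exact Array.getElem_replicate _
    · rfl
  · rfl

theorem pvASizeSet {α : Type} (c : Array α) (i : Int) (v : α) : (pvASet c i v).size = c.size := by
  unfold pvASet
  split_ifs with h
  · exact Array.size_setIfInBounds
  · rfl

theorem pvASet_pos {α : Type} (c : Array α) (j : Int) (v : α) (h0j : 0 ≤ j)
    (hj : j.toNat < c.size) : pvASet c j v = c.set j.toNat v hj := by
  unfold pvASet
  rw [if_pos h0j, Array.setIfInBounds, dif_pos hj]

theorem pvAGet_pos {α : Type} (c : Array α) (k : Int) (d : α) (h0k : 0 ≤ k)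
    (hk : k.toNat < c.size) : pvAGet c k d = (c)[k.toNat] := by
  unfold pvAGet
  rw [if_pos h0k, Array.getD, dif_pos hk]
  rfl

theorem pvAGet_upd {α : Type} (d : α) (c : Array α) (j k : Int) (w : α)
    (h0j : 0 ≤ j) (hj : j < (c.size : Int)) (h0k : 0 ≤ k) (hk : k < (c.size : Int)) :
    pvAGet (pvASet c j w) k d = if k = j then w else pvAGet c k d := by
  have hj' : j.toNat < c.size := by omega
  have hk' : k.toNat < c.size := by omega
  rw [pvASet_pos c j w h0j hj',
      pvAGet_pos _ k d h0k (by simpa using hk'),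
      pvAGet_pos c k d h0k hk', Array.getElem_set]
  by_cases h : k = j
  · rw [if_pos (by omega), if_pos h]
  · rw [if_neg (by omega), if_neg h]

theorem pvFoldlRangeGetD {β : Type} (xs : List Int) (m : Nat) (hm : m ≤ xs.length)
    (f : β → Int → β) (init : β) :
    (PySem.List.pyRange 0 (m : Int) 1).foldl (fun acc j => f acc (PySem.List.pyGetD xs j 0)) init
      = (xs.take m).foldl f init := by
  induction m with
  | zero => simp [PySem.List.pyRange_one_eq_nil (le_refl (0 : Int))]
  | succ m ih =>
      have hm' : m < xs.length := by omega
      have hcast : ((m + 1 : Nat) : Int) = (m : Int) + 1 := by push_cast; ring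
      rw [hcast, PySem.List.pyRange_one_succ_right (by positivity), List.foldl_append,
          ih (by omega), List.take_add_one, List.getElem?_eq_getElem hm']
      simp only [List.foldl_append, Option.toList_some, List.foldl_cons, List.foldl_nil]
      rw [PySem.List.pyGetD_eq_getElem xs 0 (by positivity) (by exact_mod_cast hm')]
      simp

theorem pvFoldlRangeGetDI {β : Type} (xs : List Int) (n : Int) (h0 : 0 ≤ n)
    (hm : n ≤ (xs.length : Int)) (f : β → Int → β) (init : β) :
    (PySem.List.pyRange 0 n 1).foldl (fun acc j => f acc (PySem.List.pyGetD xs j 0)) init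
      = (xs.take n.toNat).foldl f init := by
  have := pvFoldlRangeGetD xs n.toNat (by omega) f init
  rwa [show ((n.toNat : Nat) : Int) = n by omega] at this

theorem pvSizeFoldlPres {α β : Type} (f : Array α → β → Array α)
    (h : ∀ c v, (f c v).size = c.size) :
    ∀ (l : List β) (c : Array α), (l.foldl f c).size = c.size := by
  intro l
  induction l with
  | nil => intro c; rfl
  | cons v vs ih => intro c; simpa [List.foldl_cons, h] using ih (f c v)

theorem pvSizeBump (c : Array Int) (k : Int) : (pvBump c k).size = c.size := by
  simp [pvBump, pvASizeSet]

theorem pvGetDBump (c : Array Int) (j k : Int)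
    (h0j : 0 ≤ j) (hj : j < (c.size : Int)) (h0k : 0 ≤ k) (hk : k < (c.size : Int)) :
    pvAGet (pvBump c j) k 0 = pvAGet c k 0 + (if k = j then 1 else 0) := by
  unfold pvBump
  rw [pvAGet_upd 0 c j k _ h0j hj h0k hk]
  by_cases h : k = j <;> simp [h]

theorem pvFoldlConstId {β : Type} (ks : List Int) (f : β → Int → β)
    (h : ∀ st k, f st k = st) : ∀ st, ks.foldl f st = st := by
  induction ks with
  | nil => intro st; rfl
  | cons k ks ih => intro st; simp [List.foldl_cons, h, ih]

theorem pvFlatMapCongr {α β : Type} (ks : List α) (f g : α → List β)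
    (h : ∀ k ∈ ks, f k = g k) : ks.flatMap f = ks.flatMap g := by
  induction ks with
  | nil => rfl
  | cons k ks ih =>
      simp only [List.flatMap_cons, h k (by simp)]
      rw [ih (fun k hk => h k (by simp [hk]))]

theorem pvSetDComm (bb : List Int) (p q vp vq : Int) (h0p : 0 ≤ p) (h0q : 0 ≤ q) (hpq : p ≠ q) :
    PySem.List.pySetD (PySem.List.pySetD bb p vp) q vq
      = PySem.List.pySetD (PySem.List.pySetD bb q vq) p vp := by
  simp only [PySem.List.pySetD_of_nonneg _ _ h0p, PySem.List.pySetD_of_nonneg _ _ h0q]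
  exact List.set_comm vp vq (show p.toNat ≠ q.toNat by omega)

-- histogram / bucket folds ---------------------------------------------------
theorem pvHistSpec (key : Int → Int) :
    ∀ (vals : List Int) (c : Array Int) (k : Int), 0 ≤ k → k < (c.size : Int) →
      (∀ v ∈ vals, 0 ≤ key v ∧ key v < (c.size : Int)) →
      pvAGet (vals.foldl (fun cc v => pvBump cc (key v)) c) k 0
        = pvAGet c k 0 + ((pvGroup key vals k).length : Int) := by
  intro vals
  induction vals with
  | nil => intro c k _ _ _; simp [pvGroup]
  | cons v vs ih =>
      intro c k h0 h1 hall
      have hv := hall v (by simp)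
      rw [List.foldl_cons,
        ih (pvBump c (key v)) k h0 (by rw [pvSizeBump]; exact h1)
          (by intro u hu; rw [pvSizeBump]; exact hall u (by simp [hu])),
        pvGetDBump c (key v) k hv.1 hv.2 h0 h1]
      unfold pvGroup
      rw [List.filter_cons]
      by_cases h : key v = k
      · simp [h]; ring
      · have hb0 : (key v == k) = false := by simp [h]
        rw [if_neg (fun e => h e.symm)]
        simp [hb0]

theorem pvBucketsSpec (key : Int → Int) :
    ∀ (vals : List Int) (bs : Array (List Int)) (k : Int), 0 ≤ k → k < (bs.size : Int) →
      (∀ v ∈ vals, 0 ≤ key v ∧ key v < (bs.size : Int)) →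
      pvAGet (vals.foldl (fun bs v =>
            pvASet bs (key v) (pvAGet bs (key v) [] ++ [v])) bs) k []
        = pvAGet bs k [] ++ pvGroup key vals k := by
  intro vals
  induction vals with
  | nil => intro bs k _ _ _; simp [pvGroup]
  | cons v vs ih =>
      intro bs k h0 h1 hall
      have hv := hall v (by simp)
      have hsz : (pvASet bs (key v) (pvAGet bs (key v) [] ++ [v])).size = bs.size :=
        pvASizeSet _ _ _
      rw [List.foldl_cons,
        ih _ k h0 (by rw [hsz]; exact h1) (by intro u hu; rw [hsz]; exact hall u (by simp [hu])),
        pvAGet_upd [] bs (key v) k _ hv.1 hv.2 h0 h1]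
      unfold pvGroup
      rw [List.filter_cons]
      by_cases h : key v = k
      · simp [h]
      · have hb : (key v == k) = false := by simp [h]
        rw [if_neg (fun e => h e.symm)]
        simp [hb]

-- prefix-sum loop ------------------------------------------------------------
theorem pvPrefixSpec (m : Nat) (c : Array Int) (s : Int) (hm : m ≤ c.size) :
    (((PySem.List.pyRange 0 (m : Int) 1).foldl
        (fun (st : Array Int × Int) i =>
          (pvASet st.1 i st.2, st.2 + pvAGet st.1 i 0)) (c, s)).1.size = c.size) ∧
    (∀ k : Int, 0 ≤ k → k < (c.size : Int) →
      pvAGet ((PySem.List.pyRange 0 (m : Int) 1).foldl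
        (fun (st : Array Int × Int) i =>
          (pvASet st.1 i st.2, st.2 + pvAGet st.1 i 0)) (c, s)).1 k 0
        = if k < (m : Int) then s + ∑ j ∈ Finset.range k.toNat, pvAGet c (j : Int) 0
          else pvAGet c k 0) ∧
    ((PySem.List.pyRange 0 (m : Int) 1).foldl
        (fun (st : Array Int × Int) i =>
          (pvASet st.1 i st.2, st.2 + pvAGet st.1 i 0)) (c, s)).2
        = s + ∑ j ∈ Finset.range m, pvAGet c (j : Int) 0 := by
  induction m with
  | zero =>
      rw [show ((0 : Nat) : Int) = 0 by simp, PySem.List.pyRange_one_eq_nil (le_refl (0 : Int))]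
      refine ⟨rfl, ?_, by simp⟩
      intro k h0 h1
      rw [if_neg (by omega)]
      rfl
  | succ m ih =>
      obtain ⟨ihlen, ihget, ihsum⟩ := ih (by omega)
      have hmlt : m < c.size := by omega
      have hcast : ((m + 1 : Nat) : Int) = (m : Int) + 1 := by push_cast; ring
      rw [hcast, PySem.List.pyRange_one_succ_right (by positivity), List.foldl_append,
          List.foldl_cons, List.foldl_nil]
      set res := (PySem.List.pyRange 0 (m : Int) 1).foldl
        (fun (st : Array Int × Int) i =>
          (pvASet st.1 i st.2, st.2 + pvAGet st.1 i 0)) (c, s) with hres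
      have hresm : pvAGet res.1 (m : Int) 0 = pvAGet c (m : Int) 0 := by
        rw [ihget (m : Int) (by positivity) (by exact_mod_cast hmlt)]
        rw [if_neg (by omega)]
      refine ⟨?_, ?_, ?_⟩
      · simp [pvASizeSet, ihlen]
      · intro k h0 h1
        rw [pvAGet_upd 0 res.1 (m : Int) k res.2 (by positivity)
              (by rw [ihlen]; exact_mod_cast hmlt) h0 (by rw [ihlen]; exact h1)]
        by_cases hk : k = (m : Int)
        · rw [if_pos hk, if_pos (by omega), ihsum]
          congr 1
          rw [show k.toNat = m by omega]
        · rw [if_neg hk, ihget k h0 h1]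
          by_cases hk2 : k < (m : Int)
          · rw [if_pos hk2, if_pos (by omega)]
          · rw [if_neg hk2, if_neg (by omega)]
      · rw [ihsum, hresm, Finset.sum_range_succ]
        ring

-- scatter loop of A ----------------------------------------------------------
theorem pvLoop3ApplyW (key : Int → Int) :
    ∀ (vals : List Int) (b : List Int) (c : Array Int),
      (vals.foldl (fun (st : List Int × Array Int) v =>
          (PySem.List.pySetD st.1 (pvAGet st.2 (key v) 0) v,
           pvASet st.2 (key v) (pvAGet st.2 (key v) 0 + 1))) (b, c)).1
        = pvApplyW b (pvWithPos key c vals) := by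
  intro vals
  induction vals with
  | nil => intro b c; simp [pvWithPos, pvApplyW]
  | cons v vs ih =>
      intro b c
      rw [List.foldl_cons]
      rw [ih]
      simp [pvWithPos, pvApplyW, pvBump]

theorem pvWithPosFilter (key : Int → Int) :
    ∀ (vals : List Int) (c : Array Int) (k : Int), 0 ≤ k → k < (c.size : Int) →
      (∀ v ∈ vals, 0 ≤ key v ∧ key v < (c.size : Int)) →
      (pvWithPos key c vals).filter (fun w => key w.2 == k)
        = pvEnumFrom (pvAGet c k 0) (pvGroup key vals k) := by
  intro vals
  induction vals with
  | nil => intro c k _ _ _; simp [pvWithPos, pvGroup, pvEnumFrom]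
  | cons v vs ih =>
      intro c k h0 h1 hall
      have hv := hall v (by simp)
      have ih' := ih (pvBump c (key v)) k h0 (by rw [pvSizeBump]; exact h1)
        (by intro u hu; rw [pvSizeBump]; exact hall u (by simp [hu]))
      have hbk := pvGetDBump c (key v) k hv.1 hv.2 h0 h1
      by_cases h : key v = k
      · have hb : (key v == k) = true := by simp [h]
        simp only [pvWithPos, List.filter_cons, hb, if_pos]
        rw [ih', hbk, if_pos (h.symm)]
        unfold pvGroup
        rw [List.filter_cons]
        simp only [hb, if_pos]
        simp [pvEnumFrom, h]
      · have hb : (key v == k) = false := by simp [h]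
        simp only [pvWithPos, List.filter_cons, hb, Bool.false_eq_true, if_false]
        rw [ih', hbk, if_neg (fun e => h e.symm), add_zero]
        unfold pvGroup
        rw [List.filter_cons]
        simp [hb]

theorem pvSndWithPosMem (key : Int → Int) :
    ∀ (vals : List Int) (c : Array Int) (w : Int × Int), w ∈ pvWithPos key c vals → w.2 ∈ vals := by
  intro vals
  induction vals with
  | nil => intro c w h; simp [pvWithPos] at h
  | cons v vs ih =>
      intro c w h
      simp only [pvWithPos, List.mem_cons] at h
      rcases h with h | h
      · simp [h]
      · exact List.mem_cons_of_mem _ (ih _ w h)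

-- permutation of grouped writes ---------------------------------------------
theorem pvPermFlatMapFilter {α : Type} (keyf : α → Int) :
    ∀ (ks : List Int) (l : List α), ks.Nodup → (∀ x ∈ l, keyf x ∈ ks) →
      (ks.flatMap (fun k => l.filter (fun x => keyf x == k))).Perm l := by
  intro ks
  induction ks with
  | nil =>
      intro l _ h
      have : l = [] := List.eq_nil_iff_forall_not_mem.mpr (fun x hx => by simpa using h x hx)
      subst this; simp
  | cons k ks ih =>
      intro l hnd hmem
      rw [List.flatMap_cons]
      have hnd' : ks.Nodup := (List.nodup_cons.mp hnd).2
      have hknot : k ∉ ks := (List.nodup_cons.mp hnd).1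
      have hfe : ∀ k' ∈ ks, l.filter (fun x => keyf x == k')
          = (l.filter (fun x => !(keyf x == k))).filter (fun x => keyf x == k') := by
        intro k' hk'
        rw [List.filter_filter]
        apply List.filter_congr
        intro x _
        by_cases hx : keyf x = k'
        · have h2 : k' ≠ k := fun e => hknot (e ▸ hk')
          simp [hx, h2]
        · simp [hx]
      rw [pvFlatMapCongr ks _ _ hfe]
      have hmem' : ∀ x ∈ l.filter (fun x => !(keyf x == k)), keyf x ∈ ks := by
        intro x hx
        have hxl : x ∈ l := List.mem_of_mem_filter hx
        have hne : keyf x ≠ k := by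
          have := List.of_mem_filter hx
          simpa using this
        have := hmem x hxl
        simp only [List.mem_cons] at this
        tauto
      exact List.Perm.trans
        (List.Perm.append_left (l.filter (fun x => keyf x == k)) (ih _ hnd' hmem'))
        (List.filter_append_perm _ l)

-- B's write-back loop --------------------------------------------------------
theorem pvInnerWrite :
    ∀ (bucket : List Int) (st : List Int × Int),
      bucket.foldl (fun (st : List Int × Int) v => (PySem.List.pySetD st.1 st.2 v, st.2 + 1)) st
        = (pvApplyW st.1 (pvEnumFrom st.2 bucket), st.2 + bucket.length) := by
  intro bucket
  induction bucket with
  | nil => intro st; simp [pvApplyW, pvEnumFrom]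
  | cons v vs ih =>
      intro st
      rw [List.foldl_cons, ih]
      simp [pvApplyW, pvEnumFrom]
      omega

theorem pvOuterWrite (g : Int → List Int) :
    ∀ (ks : List Int) (b : List Int) (idx : Int),
      (ks.foldl (fun (st : List Int × Int) k =>
          (g k).foldl (fun (st : List Int × Int) v => (PySem.List.pySetD st.1 st.2 v, st.2 + 1)) st)
        (b, idx)).1 = pvApplyW b (pvGW g ks idx) := by
  intro ks
  induction ks with
  | nil => intro b idx; simp [pvGW, pvApplyW]
  | cons k ks ih =>
      intro b idx
      rw [List.foldl_cons, pvInnerWrite (g k) (b, idx)]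
      rw [ih]
      simp [pvGW, pvApplyW, List.foldl_append]

theorem pvGWCongr (g g' : Int → List Int) :
    ∀ (ks : List Int) (idx : Int), (∀ k ∈ ks, g k = g' k) → pvGW g ks idx = pvGW g' ks idx := by
  intro ks
  induction ks with
  | nil => intro idx _; rfl
  | cons k ks ih =>
      intro idx h
      simp only [pvGW, h k (by simp)]
      rw [ih _ (fun k hk => h k (by simp [hk]))]

theorem pvGWFlat (key : Int → Int) (vals : List Int) :
    ∀ (m : Nat) (k0 : Int), 0 ≤ k0 →
      pvGW (pvGroup key vals) (PySem.List.pyRange k0 (k0 + (m : Int)) 1) (pvOff key vals k0)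
        = (PySem.List.pyRange k0 (k0 + (m : Int)) 1).flatMap
            (fun k => pvEnumFrom (pvOff key vals k) (pvGroup key vals k)) := by
  intro m
  induction m with
  | zero =>
      intro k0 _
      rw [show k0 + ((0 : Nat) : Int) = k0 by simp, PySem.List.pyRange_one_eq_nil (le_refl k0)]
      simp [pvGW]
  | succ m ih =>
      intro k0 h0
      have hm : (0 : Int) ≤ (m : Int) := by positivity
      have hcast : k0 + ((m + 1 : Nat) : Int) = (k0 + 1) + (m : Int) := by push_cast; ring
      rw [hcast, PySem.List.pyRange_one_cons (by omega), pvGW, List.flatMap_cons]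
      have hoff : pvOff key vals k0 + ((pvGroup key vals k0).length : Int)
          = pvOff key vals (k0 + 1) := by
        unfold pvOff
        rw [show (k0 + 1).toNat = k0.toNat + 1 by omega, Finset.sum_range_succ,
            show ((k0.toNat : Int)) = k0 by omega]
      rw [hoff, ih (k0 + 1) (by omega)]

-- position facts -------------------------------------------------------------
theorem pvMemEnumFrom : ∀ (l : List Int) (s : Int) (w : Int × Int),
    w ∈ pvEnumFrom s l → s ≤ w.1 ∧ w.1 < s + (l.length : Int) := by
  intro l
  induction l with
  | nil => intro s w h; simp [pvEnumFrom] at h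
  | cons v vs ih =>
      intro s w h
      simp only [pvEnumFrom, List.mem_cons] at h
      rcases h with h | h
      · subst h; simp
      · have := ih (s + 1) w h
        simp only [List.length_cons] at *
        push_cast at this ⊢
        omega

theorem pvPairwiseEnumFrom : ∀ (l : List Int) (s : Int),
    (pvEnumFrom s l).Pairwise (fun w w' => w.1 < w'.1) := by
  intro l
  induction l with
  | nil => intro s; simp [pvEnumFrom]
  | cons v vs ih =>
      intro s
      simp only [pvEnumFrom, List.pairwise_cons]
      exact ⟨fun w hw => lt_of_lt_of_le (lt_add_one s) (pvMemEnumFrom vs (s + 1) w hw).1, ih (s + 1)⟩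

theorem pvOffMono (key : Int → Int) (vals : List Int) (k k' : Int) (h0 : 0 ≤ k) (h : k < k') :
    pvOff key vals k + ((pvGroup key vals k).length : Int) ≤ pvOff key vals k' := by
  unfold pvOff
  have hk : (k.toNat : Int) = k := by omega
  have hsub : Finset.range (k.toNat + 1) ⊆ Finset.range k'.toNat := by
    intro x hx
    simp only [Finset.mem_range] at *
    omega
  calc (∑ j ∈ Finset.range k.toNat, ((pvGroup key vals (j : Int)).length : Int))
        + ((pvGroup key vals k).length : Int)
      = ∑ j ∈ Finset.range (k.toNat + 1), ((pvGroup key vals (j : Int)).length : Int) := by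
        rw [Finset.sum_range_succ, hk]
    _ ≤ ∑ j ∈ Finset.range k'.toNat, ((pvGroup key vals (j : Int)).length : Int) :=
        Finset.sum_le_sum_of_subset_of_nonneg hsub (fun j _ _ => by positivity)

theorem pvOffNonneg (key : Int → Int) (vals : List Int) (k : Int) : 0 ≤ pvOff key vals k := by
  unfold pvOff
  exact Finset.sum_nonneg fun j _ => by positivity

theorem pvPairwiseFlat (g : Int → List Int) (off : Int → Int)
    (hmono : ∀ k k' : Int, 0 ≤ k → k < k' → off k + ((g k).length : Int) ≤ off k') :
    ∀ ks : List Int, ks.Pairwise (· < ·) → (∀ k ∈ ks, 0 ≤ k) →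
      (ks.flatMap (fun k => pvEnumFrom (off k) (g k))).Pairwise (fun w w' => w.1 < w'.1) := by
  intro ks
  induction ks with
  | nil => intro _ _; simp
  | cons k ks ih =>
      intro hpw hnn
      rw [List.flatMap_cons, List.pairwise_append]
      obtain ⟨hk_lt, hpw'⟩ := List.pairwise_cons.mp hpw
      refine ⟨pvPairwiseEnumFrom _ _, ih hpw' (fun k' h => hnn k' (by simp [h])), ?_⟩
      intro w hw w' hw'
      obtain ⟨k', hk', hw'2⟩ := List.mem_flatMap.mp hw'
      have h1 := (pvMemEnumFrom _ _ _ hw).2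
      have h2 := (pvMemEnumFrom _ _ _ hw'2).1
      have hlt := hk_lt k' hk'
      have hm := hmono k k' (hnn k (by simp)) hlt
      omega

-- commuting distinct writes --------------------------------------------------
theorem pvApplyWPerm (ws1 ws2 : List (Int × Int)) (b : List Int)
    (hp : ws1.Perm ws2) (hpw : ws1.Pairwise (fun w w' => w.1 < w'.1))
    (hnn : ∀ w ∈ ws1, 0 ≤ w.1) :
    pvApplyW b ws1 = pvApplyW b ws2 := by
  unfold pvApplyW
  refine List.Perm.foldl_eq' hp ?_ b
  intro x hx y hy z
  by_cases hxy : x = y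
  · subst hxy; rfl
  · have hne : x.1 ≠ y.1 := by
      have hsym : Symmetric (fun (w w' : Int × Int) => w.1 ≠ w'.1) := fun _ _ h => h.symm
      exact List.Pairwise.forall hsym (hpw.imp (fun h => ne_of_lt h)) hx hy hxy
    exact pvSetDComm z x.1 y.1 x.2 y.2 (hnn x hx) (hnn y hy) hne

-- transliteration bridges (index loops over range(n) become folds over a[:n]) --
theorem pvLoop1ConvI (a r : List Int) (c0 : Array Int) (n : Int) (h0 : 0 ≤ n)
    (hm : n ≤ (a.length : Int)) :
    (PySem.List.pyRange 0 n 1).foldl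
      (fun c i =>
        pvASet c (PySem.List.pyGetD r (PySem.List.pyGetD a i 0) 0)
          (pvAGet c (PySem.List.pyGetD r (PySem.List.pyGetD a i 0) 0) 0 + 1)) c0
      = (a.take n.toNat).foldl (fun c v => pvBump c (PySem.List.pyGetD r v 0)) c0 :=
  pvFoldlRangeGetDI a n h0 hm (fun c v => pvBump c (PySem.List.pyGetD r v 0)) c0

theorem pvBucketConvI (a r : List Int) (bs0 : Array (List Int)) (n : Int) (h0 : 0 ≤ n)
    (hm : n ≤ (a.length : Int)) :
    (PySem.List.pyRange 0 n 1).foldl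
      (fun bs i =>
        pvASet bs (PySem.List.pyGetD r (PySem.List.pyGetD a i 0) 0)
          (pvAGet bs (PySem.List.pyGetD r (PySem.List.pyGetD a i 0) 0) []
            ++ [PySem.List.pyGetD a i 0])) bs0
      = (a.take n.toNat).foldl
          (fun bs v =>
            pvASet bs (PySem.List.pyGetD r v 0)
              (pvAGet bs (PySem.List.pyGetD r v 0) [] ++ [v])) bs0 :=
  pvFoldlRangeGetDI a n h0 hm
    (fun bs v =>
      pvASet bs (PySem.List.pyGetD r v 0)
        (pvAGet bs (PySem.List.pyGetD r v 0) [] ++ [v])) bs0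

theorem pvLoop3ConvI (a b0 r : List Int) (c0 : Array Int) (n : Int) (h0 : 0 ≤ n)
    (hm : n ≤ (a.length : Int)) :
    ((PySem.List.pyRange 0 n 1).foldl
      (fun (st : List Int × Array Int) i =>
        (PySem.List.pySetD st.1
            (pvAGet st.2 (PySem.List.pyGetD r (PySem.List.pyGetD a i 0) 0) 0)
            (PySem.List.pyGetD a i 0),
         pvASet st.2 (PySem.List.pyGetD r (PySem.List.pyGetD a i 0) 0)
           (pvAGet st.2 (PySem.List.pyGetD r (PySem.List.pyGetD a i 0) 0) 0 + 1)))
      (b0, c0)).1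
      = pvApplyW b0 (pvWithPos (fun v => PySem.List.pyGetD r v 0) c0 (a.take n.toNat)) :=
  Eq.trans
    (congrArg Prod.fst
      (pvFoldlRangeGetDI a n h0 hm
        (fun (st : List Int × Array Int) v =>
          (PySem.List.pySetD st.1 (pvAGet st.2 (PySem.List.pyGetD r v 0) 0) v,
           pvASet st.2 (PySem.List.pyGetD r v 0)
             (pvAGet st.2 (PySem.List.pyGetD r v 0) 0 + 1))) (b0, c0)))
    (pvLoop3ApplyW (fun v => PySem.List.pyGetD r v 0) (a.take n.toNat) b0 c0)

theorem pvOuterWriteG (BF : Array (List Int)) (ks : List Int) (b : List Int) (idx : Int) :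
    (ks.foldl
      (fun (st : List Int × Int) key =>
        (pvAGet BF key []).foldl
          (fun (st : List Int × Int) v => (PySem.List.pySetD st.1 st.2 v, st.2 + 1)) st)
      (b, idx)).1
      = pvApplyW b (pvGW (fun k => pvAGet BF k []) ks idx) :=
  pvOuterWrite (fun k => pvAGet BF k []) ks b idx

-- main assembly ---------------------------------------------------------------
theorem pvMainEq (a b r : List Int) (n K : Int) (h0 : 0 ≤ n) (hK : 0 ≤ K)
    (hna : n ≤ (a.length : Int))
    (hvals : ∀ v ∈ a.take n.toNat, 0 ≤ v ∧ v < (r.length : Int) ∧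
      0 ≤ PySem.List.pyGetD r v 0 ∧ PySem.List.pyGetD r v 0 ≤ K) :
    radixPass a b r n K = radixPass_alt a b r n K := by
  simp only [radixPass, radixPass_alt]
  rw [pvLoop1ConvI a r (Array.replicate (K + 1).toNat 0) n h0 hna,
      pvBucketConvI a r (Array.replicate (K + 1).toNat []) n h0 hna,
      pvLoop3ConvI a b r _ n h0 hna,
      pvOuterWriteG _ (PySem.List.pyRange 0 (K + 1) 1) b 0]
  set KL := (K + 1).toNat with hKLdef
  have hKLI : ((KL : Nat) : Int) = K + 1 := by omega
  set vals := List.take n.toNat a with hvalsdef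
  set C1 := List.foldl (fun c v => pvBump c (PySem.List.pyGetD r v 0))
    (Array.replicate KL 0) vals with hC1def
  set BF := List.foldl
      (fun bs v => pvASet bs (PySem.List.pyGetD r v 0)
        (pvAGet bs (PySem.List.pyGetD r v 0) [] ++ [v]))
      (Array.replicate KL ([] : List Int)) vals with hBFdef
  have hkeys : ∀ v ∈ vals, 0 ≤ PySem.List.pyGetD r v 0 ∧
      PySem.List.pyGetD r v 0 < ((KL : Nat) : Int) := by
    intro v hv
    have h := hvals v hv
    exact ⟨h.2.2.1, by omega⟩
  have hC1len : C1.size = KL := by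
    rw [hC1def]
    simpa using pvSizeFoldlPres _ (fun c v => pvSizeBump c _) vals (Array.replicate KL 0)
  have hC1get : ∀ k : Int, 0 ≤ k → k < ((KL : Nat) : Int) →
      pvAGet C1 k 0 = ((pvGroup (fun v => PySem.List.pyGetD r v 0) vals k).length : Int) := by
    intro k h0k h1k
    have h := pvHistSpec (fun v => PySem.List.pyGetD r v 0) vals (Array.replicate KL 0) k h0k
      (by simpa using h1k) (by intro v hv; simpa using hkeys v hv)
    rw [pvAGetReplicate] at h
    rw [hC1def]
    simpa using h
  have hps := pvPrefixSpec KL C1 0 (le_of_eq hC1len.symm)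
  rw [hKLI] at hps
  set C2 := (List.foldl
      (fun (st : Array Int × Int) i =>
        (pvASet st.1 i st.2, st.2 + pvAGet st.1 i 0))
      (C1, 0) (PySem.List.pyRange 0 (K + 1) 1)).1 with hC2def
  have hC2len : C2.size = KL := hps.1.trans hC1len
  have hC2get : ∀ k : Int, 0 ≤ k → k < ((KL : Nat) : Int) →
      pvAGet C2 k 0 = pvOff (fun v => PySem.List.pyGetD r v 0) vals k := by
    intro k h0k h1k
    have h := hps.2.1 k h0k (by rw [hC1len]; exact h1k)
    rw [if_pos (by omega)] at h
    rw [h, zero_add]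
    unfold pvOff
    apply Finset.sum_congr rfl
    intro j hj
    have hjlt : ((j : Nat) : Int) < ((KL : Nat) : Int) := by
      simp only [Finset.mem_range] at hj
      omega
    exact hC1get (j : Int) (by positivity) hjlt
  have hBFget : ∀ k ∈ PySem.List.pyRange 0 (K + 1) 1, pvAGet BF k []
      = pvGroup (fun v => PySem.List.pyGetD r v 0) vals k := by
    intro k hk
    obtain ⟨hk0, hk1⟩ := PySem.List.mem_pyRange_one.mp hk
    have h := pvBucketsSpec (fun v => PySem.List.pyGetD r v 0) vals (Array.replicate KL []) k hk0
      (by simpa using (by omega : k < ((KL : Nat) : Int)))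
      (by intro v hv; simpa using hkeys v hv)
    rw [pvAGetReplicate] at h
    rw [hBFdef]
    simpa using h
  have hgw : pvGW (fun k => pvAGet BF k []) (PySem.List.pyRange 0 (K + 1) 1) 0
      = (PySem.List.pyRange 0 (K + 1) 1).flatMap
          (fun k => pvEnumFrom (pvOff (fun v => PySem.List.pyGetD r v 0) vals k)
            (pvGroup (fun v => PySem.List.pyGetD r v 0) vals k)) := by
    rw [pvGWCongr (fun k => pvAGet BF k [])
      (pvGroup (fun v => PySem.List.pyGetD r v 0) vals) (PySem.List.pyRange 0 (K + 1) 1) 0 hBFget]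
    have h := pvGWFlat (fun v => PySem.List.pyGetD r v 0) vals KL 0 (le_refl 0)
    rw [show (0 : Int) + ((KL : Nat) : Int) = K + 1 by omega] at h
    rw [show pvOff (fun v => PySem.List.pyGetD r v 0) vals 0 = 0 by simp [pvOff]] at h
    exact h
  rw [hgw]
  have hfilter : ∀ k ∈ PySem.List.pyRange 0 (K + 1) 1,
      pvEnumFrom (pvOff (fun v => PySem.List.pyGetD r v 0) vals k)
          (pvGroup (fun v => PySem.List.pyGetD r v 0) vals k)
        = (pvWithPos (fun v => PySem.List.pyGetD r v 0) C2 vals).filter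
            (fun w => PySem.List.pyGetD r w.2 0 == k) := by
    intro k hk
    obtain ⟨hk0, hk1⟩ := PySem.List.mem_pyRange_one.mp hk
    have h : (pvWithPos (fun v => PySem.List.pyGetD r v 0) C2 vals).filter
        (fun w => PySem.List.pyGetD r w.2 0 == k)
        = pvEnumFrom (pvAGet C2 k 0)
            (pvGroup (fun v => PySem.List.pyGetD r v 0) vals k) :=
      pvWithPosFilter (fun v => PySem.List.pyGetD r v 0) vals C2 k hk0
        (by rw [hC2len]; omega)
        (by intro v hv; rw [hC2len]; simpa using hkeys v hv)
    rw [h, hC2get k hk0 (by omega)]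
  have hperm : ((PySem.List.pyRange 0 (K + 1) 1).flatMap
      (fun k => (pvWithPos (fun v => PySem.List.pyGetD r v 0) C2 vals).filter
        (fun w => PySem.List.pyGetD r w.2 0 == k))).Perm
      (pvWithPos (fun v => PySem.List.pyGetD r v 0) C2 vals) :=
    pvPermFlatMapFilter (fun w => PySem.List.pyGetD r w.2 0) (PySem.List.pyRange 0 (K + 1) 1)
      (pvWithPos (fun v => PySem.List.pyGetD r v 0) C2 vals)
      (PySem.List.nodup_pyRange_one _ _)
      (by intro w hw
          have hv := pvSndWithPosMem (fun v => PySem.List.pyGetD r v 0) vals C2 w hw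
          have hb := hkeys w.2 hv
          exact PySem.List.mem_pyRange_one.mpr
            ⟨hb.1, show PySem.List.pyGetD r w.2 0 < K + 1 by omega⟩)
  rw [← pvFlatMapCongr _ _ _ hfilter] at hperm
  have hpair := pvPairwiseFlat (pvGroup (fun v => PySem.List.pyGetD r v 0) vals)
    (pvOff (fun v => PySem.List.pyGetD r v 0) vals)
    (pvOffMono (fun v => PySem.List.pyGetD r v 0) vals)
    (PySem.List.pyRange 0 (K + 1) 1) (PySem.List.pairwise_lt_pyRange_one _ _)
    (fun k hk => (PySem.List.mem_pyRange_one.mp hk).1)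
  have hnn : ∀ w ∈ (PySem.List.pyRange 0 (K + 1) 1).flatMap
      (fun k => pvEnumFrom (pvOff (fun v => PySem.List.pyGetD r v 0) vals k)
        (pvGroup (fun v => PySem.List.pyGetD r v 0) vals k)), 0 ≤ w.1 := by
    intro w hw
    obtain ⟨k, hk, hw2⟩ := List.mem_flatMap.mp hw
    have h1 := (pvMemEnumFrom _ _ _ hw2).1
    have h2 := pvOffNonneg (fun v => PySem.List.pyGetD r v 0) vals k
    omega
  exact (pvApplyWPerm _ _ b hperm hpair hnn).symm

-- ===== VERDICT (by name: the statement is the Claim_ definition above) =====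
theorem radixPass_spec : Claim_equal_radixPass := by
  intro a b r n K _ hpre
  unfold Spec_radixPass
  by_cases hn : n ≤ 0
  · simp only [radixPass, radixPass_alt]
    rw [PySem.List.pyRange_one_eq_nil hn]
    simp only [List.foldl_nil]
    rw [pvFoldlConstId (PySem.List.pyRange 0 (K + 1) 1)
      (fun (st : List Int × Int) key =>
        (pvAGet (Array.replicate (K + 1).toNat ([] : List Int)) key []).foldl
          (fun (st : List Int × Int) v => (PySem.List.pySetD st.1 st.2 v, st.2 + 1)) st)
      (fun st k => by simp only [pvAGetReplicate, List.foldl_nil]) (b, 0)]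
  · rcases hpre with h | ⟨hK, hna, hnb, hvals⟩
    · omega
    · exact pvMainEq a b r n K (by omega) hK hna hvals
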